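-- pv_equiv track=rewrite | github.com/hojoungjang/programming-exercises | 비슷한-단어/solution.py | solution
-- ===== SOURCE A (Python) =====
-- from collections import Counter
--
-- def solution(word: str, cmp_words: list[str]) -> int:
--     similar_count = 0
--     word_char_counts = Counter(word)
--
--     for cmp_word in cmp_words:
--         cmp_word_char_counts = Counter(cmp_word)
--         cmp_word_char_counts.subtract(word_char_counts)
--
--         diff_pos_sum = 0
--         diff_neg_sum = 0
--         for diff in cmp_word_char_counts.values():
--             if diff < 0:
--                 diff_neg_sum += abs(diff)
--             else:
--                 diff_pos_sum += diff
--         if max(diff_pos_sum, diff_neg_sum) < 2: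
--             similar_count += 1
--
--     return similar_count
-- ===== SOURCE B (Python) =====
-- def solution(word: str, cmp_words: list[str]) -> int:
--     sorted_word = sorted(word)
--     similar_count = 0
--     for cmp_word in cmp_words:
--         sorted_cmp = sorted(cmp_word)
--         i = j = common = 0
--         while i < len(sorted_word) and j < len(sorted_cmp):
--             if sorted_word[i] == sorted_cmp[j]:
--                 common += 1
--                 i += 1
--                 j += 1
--             elif sorted_word[i] < sorted_cmp[j]:
--                 i += 1
--             else:
--                 j += 1
--         if len(cmp_word) - common < 2 and len(word) - common < 2:
--             similar_count += 1
--     return similar_count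
-- ===== Notes on version B (the rewrite author's own statement) =====
-- stated objective: alternative
-- what changed: Replaces the Counter-subtract and signed per-character diff sums with sort-both-strings and a two-pointer merge that counts the multiset overlap, testing surplus = len(cmp)-common and missing = len(word)-common.
import Mathlib
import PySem

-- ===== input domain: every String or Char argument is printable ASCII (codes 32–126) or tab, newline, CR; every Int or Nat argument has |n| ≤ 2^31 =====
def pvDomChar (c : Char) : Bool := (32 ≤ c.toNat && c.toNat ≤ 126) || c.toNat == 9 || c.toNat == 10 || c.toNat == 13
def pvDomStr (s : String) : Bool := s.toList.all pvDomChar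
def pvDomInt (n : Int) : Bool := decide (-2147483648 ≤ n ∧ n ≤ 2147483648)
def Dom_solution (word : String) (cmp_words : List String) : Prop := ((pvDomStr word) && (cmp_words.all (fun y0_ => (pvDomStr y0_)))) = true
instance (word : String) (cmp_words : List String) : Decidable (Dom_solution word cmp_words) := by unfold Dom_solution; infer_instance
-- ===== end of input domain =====

-- B replaces A's Counter-subtract/signed-diff sums by sorting both strings and a two-pointer
-- merge counting the multiset overlap (objective: alternative; equal return value proved below).

-- ===== PORT A =====
def solution (word : String) (cmp_words : List String) : Int :=
  let word_char_counts := PySem.Dict.counter word.toList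
  cmp_words.foldl (fun similar_count cmp_word =>
    let cmp_word_char_counts := PySem.Dict.counter cmp_word.toList
    let subtracted := word_char_counts.items.foldl
      (fun d p => d.modify p.1 0 (fun x => x - p.2)) cmp_word_char_counts
    let sums := subtracted.values.foldl
      (fun (s : Int × Int) diff =>
        if diff < 0 then (s.1, s.2 + |diff|) else (s.1 + diff, s.2)) (0, 0)
    if max sums.1 sums.2 < 2 then similar_count + 1 else similar_count) 0

-- ===== PORT B =====
-- the two-pointer while loop of Source B as the obvious structural recursion on the two sorted lists
def mergeCommon : List Char → List Char → Int
  | [], _ => 0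
  | _ :: _, [] => 0
  | x :: xs, y :: ys =>
    if x = y then 1 + mergeCommon xs ys
    else if x < y then mergeCommon xs (y :: ys)
    else mergeCommon (x :: xs) ys
termination_by xs ys => xs.length + ys.length

def solution_alt (word : String) (cmp_words : List String) : Int :=
  let sorted_word := PySem.List.sorted word.toList (fun c => c) false
  cmp_words.foldl (fun similar_count cmp_word =>
    let sorted_cmp := PySem.List.sorted cmp_word.toList (fun c => c) false
    let common := mergeCommon sorted_word sorted_cmp
    if (cmp_word.toList.length : Int) - common < 2 ∧ (word.toList.length : Int) - common < 2
    then similar_count + 1 else similar_count) 0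

-- ===== PRECONDITION & SPEC =====
def Spec_solution (word : String) (cmp_words : List String) (out : Int) : Prop := out = solution_alt word cmp_words
instance (word : String) (cmp_words : List String) (out : Int) : Decidable (Spec_solution word cmp_words out) := by unfold Spec_solution; infer_instance

-- ===== CLAIM (what is proved, stated in full; the proofs are below) =====
def Claim_equal_solution : Prop := ∀ (word : String) (cmp_words : List String), Dom_solution word cmp_words → Spec_solution word cmp_words (solution word cmp_words)

-- ===== LEMMAS AND PROOFS =====


theorem mergeCommon_eq (xs ys : List Char)
    (hx : xs.Pairwise (· ≤ ·)) (hy : ys.Pairwise (· ≤ ·)) :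
    mergeCommon xs ys = (((xs : Multiset Char) ∩ (ys : Multiset Char)).card : Int) := by
  induction xs, ys using mergeCommon.induct with
  | case1 ys => simp [mergeCommon]
  | case2 x xs => simp [mergeCommon]
  | case3 xs y ys ih =>
    rw [List.pairwise_cons] at hx hy
    simp only [mergeCommon, ih hx.2 hy.2]
    rw [show ((y :: xs : List Char) : Multiset Char) = y ::ₘ (xs : Multiset Char) from rfl,
        show ((y :: ys : List Char) : Multiset Char) = y ::ₘ (ys : Multiset Char) from rfl,
        Multiset.cons_inter_of_pos _ (Multiset.mem_cons_self y _), Multiset.erase_cons_head]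
    simp; ring
  | case4 x xs y ys hne hlt ih =>
    rw [List.pairwise_cons] at hx
    have hx' : x ∉ ((y :: ys : List Char) : Multiset Char) := by
      simp only [Multiset.mem_coe, List.mem_cons]
      rintro (rfl | hmem)
      · exact hne rfl
      · rw [List.pairwise_cons] at hy
        exact absurd (hy.1 x hmem) (not_le.mpr hlt)
    rw [show ((x :: xs : List Char) : Multiset Char) = x ::ₘ (xs : Multiset Char) from rfl] at *
    simp only [mergeCommon, if_neg hne, if_pos hlt, ih hx.2 hy]
    rw [Multiset.cons_inter_of_neg _ hx']
  | case5 x xs y ys hne hnlt ih =>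
    rw [List.pairwise_cons] at hy
    have hy' : y ∉ ((x :: xs : List Char) : Multiset Char) := by
      simp only [Multiset.mem_coe, List.mem_cons]
      rintro (rfl | hmem)
      · exact hne rfl
      · rw [List.pairwise_cons] at hx
        have := hx.1 y hmem
        have hgt : y < x := lt_of_le_of_ne (not_lt.mp hnlt) (fun h => hne h.symm)
        exact absurd this (not_le.mpr hgt)
    have key : ((x :: xs : List Char) : Multiset Char) ∩ ((y :: ys : List Char) : Multiset Char)
        = ((x :: xs : List Char) : Multiset Char) ∩ (ys : Multiset Char) := by
      rw [show ((y :: ys : List Char) : Multiset Char) = y ::ₘ (ys : Multiset Char) from rfl,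
          Multiset.inter_comm, Multiset.cons_inter_of_neg _ hy', Multiset.inter_comm]
    simp only [mergeCommon, if_neg hne, if_neg hnlt, ih hx hy.2, key]

theorem getD_subFold (l : List (Char × Int)) (d : PySem.Dict Char Int) (c : Char) :
    (l.foldl (fun d p => d.modify p.1 0 (fun x => x - p.2)) d).getD c 0
      = d.getD c 0 - ((l.filter (fun p => p.1 = c)).map (·.2)).sum := by
  induction l generalizing d with
  | nil => simp
  | cons p l ih =>
    simp only [List.foldl_cons, ih, List.filter_cons]
    rw [PySem.Dict.getD_modify]
    by_cases h : c = p.1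
    · subst h
      simp
      ring
    · have h' : ¬ p.1 = c := fun hh => h hh.symm
      simp [h, h']

theorem sum_filter_map (U : List Char) (hU : U.Nodup) (g : Char → Int) (c : Char) :
    (((U.map (fun k => (k, g k))).filter (fun p => p.1 = c)).map (·.2)).sum
      = if c ∈ U then g c else 0 := by
  induction U with
  | nil => simp
  | cons a U ih =>
    rw [List.nodup_cons] at hU
    simp only [List.map_cons, List.filter_cons, List.mem_cons]
    by_cases h : a = c
    · subst h
      have hnone : ∀ p ∈ (U.map (fun k => (k, g k))), ¬ (p.1 = a) := by
        rintro ⟨k, v⟩ hp hk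
        simp only [List.mem_map] at hp
        obtain ⟨k', hk', he⟩ := hp
        cases he
        exact hU.1 (hk ▸ hk')
      have hfil : (List.filter (fun p => decide (p.1 = a)) (U.map fun k => (k, g k))) = [] :=
        List.filter_eq_nil_iff.mpr (by intro p hp; simpa using hnone p hp)
      simp [hfil]
    · have h' : ¬ c = a := fun hh => h hh.symm
      simp [h, h', ih hU.2]

theorem foldPair (vs : List Int) (a b : Int) :
    vs.foldl (fun (s : Int × Int) diff =>
        if diff < 0 then (s.1, s.2 + |diff|) else (s.1 + diff, s.2)) (a, b)
      = (a + (vs.map (fun d => max d 0)).sum, b + (vs.map (fun d => max (-d) 0)).sum) := by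
  induction vs generalizing a b with
  | nil => simp
  | cons v vs ih =>
    simp only [List.foldl_cons, List.map_cons, List.sum_cons]
    by_cases h : v < 0
    · rw [if_pos h, ih, abs_of_neg h, max_eq_right (by omega : v ≤ (0:Int)),
        max_eq_left (by omega : (0:Int) ≤ -v), Prod.mk.injEq]
      constructor <;> ring
    · rw [if_neg h, ih, max_eq_left (by omega : (0:Int) ≤ v),
        max_eq_right (by omega : -v ≤ (0:Int)), Prod.mk.injEq]
      constructor <;> ring

theorem sum_count_list (U : List Char) (hU : U.Nodup) (s : Multiset Char)
    (hs : ∀ c ∈ s, c ∈ U) :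
    (U.map (fun c => (s.count c : Int))).sum = (Multiset.card s : Int) := by
  have h1 : (U.map (fun c => (s.count c : Int))).sum
      = ((U.toFinset.sum (fun c => s.count c) : ℕ) : Int) := by
    rw [List.sum_toFinset _ hU]
    push_cast
    rw [List.map_map]
    rfl
  rw [h1, ← Multiset.toFinset_sum_count_eq s]
  congr 1
  refine (Finset.sum_subset ?_ ?_).symm
  · intro c hc
    rw [Multiset.mem_toFinset] at hc
    rw [List.mem_toFinset]
    exact hs c hc
  · intro c _ hc
    rw [Multiset.mem_toFinset] at hc
    exact Multiset.count_eq_zero_of_notMem hc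

theorem sum_map_sub (U : List Char) (f g : Char → Int) :
    (U.map (fun c => f c - g c)).sum = (U.map f).sum - (U.map g).sum := by
  induction U with
  | nil => simp
  | cons a U ih => simp [ih]; ring

theorem subtract_getD (w cw : List Char) (c : Char) :
    ((PySem.Dict.counter w).items.foldl (fun d p => d.modify p.1 0 (fun x => x - p.2))
        (PySem.Dict.counter cw)).getD c 0 = (cw.count c : Int) - (w.count c : Int) := by
  rw [getD_subFold, PySem.Dict.getD_counter, PySem.Dict.items_counter,
    sum_filter_map _ (PySem.Set.nodup_ofList w) (fun k => ((w.count k : Nat) : Int)) c]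
  by_cases h : c ∈ PySem.Set.ofList w
  · simp [h]
  · have h0 : w.count c = 0 := List.count_eq_zero.mpr (by
      intro hc
      exact h ((PySem.Set.mem_ofList w c).mpr hc))
    simp [h, h0]

theorem keys_subtract (w cw : List Char) :
    ((PySem.Dict.counter w).items.foldl (fun d p => d.modify p.1 0 (fun x => x - p.2))
        (PySem.Dict.counter cw)).keys
      = PySem.Set.update (PySem.Set.ofList cw) (PySem.Set.ofList w) := by
  have h := PySem.Dict.keys_foldl_modify_key (κ := Char) (ν := Int)
    ((PySem.Dict.counter w).items) (fun p => p.1) 0 (fun _ p => fun x => x - p.2)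
    (PySem.Dict.counter cw)
  calc ((PySem.Dict.counter w).items.foldl
          (fun d p => d.modify p.1 0 (fun x => x - p.2)) (PySem.Dict.counter cw)).keys
      = PySem.Set.update (PySem.Dict.counter cw).keys
          ((PySem.Dict.counter w).items.map (fun p => p.1)) := h
    _ = PySem.Set.update (PySem.Set.ofList cw) (PySem.Set.ofList w) := by
        rw [PySem.Dict.keys_counter, PySem.Dict.items_counter, List.map_map]
        simp [Function.comp_def]

theorem nodup_keys_subtract (w cw : List Char) :
    ((PySem.Dict.counter w).items.foldl (fun d p => d.modify p.1 0 (fun x => x - p.2))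
        (PySem.Dict.counter cw)).keys.Nodup :=
  PySem.Dict.nodup_keys_foldl_modify_key (β := Char × Int) _ (fun p => p.1) 0
    (fun _ p => fun x => x - p.2) _ (PySem.Dict.nodup_keys_counter cw)

theorem values_subtract (w cw : List Char) :
    ((PySem.Dict.counter w).items.foldl (fun d p => d.modify p.1 0 (fun x => x - p.2))
        (PySem.Dict.counter cw)).values
      = (PySem.Set.update (PySem.Set.ofList cw) (PySem.Set.ofList w)).map
          (fun c => (cw.count c : Int) - (w.count c : Int)) := by
  rw [PySem.Dict.values_eq_map_keys _ (nodup_keys_subtract w cw) 0, keys_subtract]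
  exact List.map_congr_left (fun c _ => subtract_getD w cw c)

theorem sums_subtract (w cw : List Char) :
    (((PySem.Dict.counter w).items.foldl (fun d p => d.modify p.1 0 (fun x => x - p.2))
          (PySem.Dict.counter cw)).values.foldl
        (fun (s : Int × Int) diff =>
          if diff < 0 then (s.1, s.2 + |diff|) else (s.1 + diff, s.2)) (0, 0))
      = ((cw.length : Int) - (((cw : Multiset Char) ∩ (w : Multiset Char)).card : Int),
         (w.length : Int) - (((cw : Multiset Char) ∩ (w : Multiset Char)).card : Int)) := by
  have hU : (PySem.Set.update (PySem.Set.ofList cw) (PySem.Set.ofList w)).Nodup := by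
    rw [← keys_subtract w cw]; exact nodup_keys_subtract w cw
  have hmemcw : ∀ c ∈ (cw : Multiset Char),
      c ∈ PySem.Set.update (PySem.Set.ofList cw) (PySem.Set.ofList w) := by
    intro c hc
    exact (PySem.Set.mem_update _ _ c).mpr (Or.inl ((PySem.Set.mem_ofList cw c).mpr (by simpa using hc)))
  have hmemw : ∀ c ∈ (w : Multiset Char),
      c ∈ PySem.Set.update (PySem.Set.ofList cw) (PySem.Set.ofList w) := by
    intro c hc
    exact (PySem.Set.mem_update _ _ c).mpr (Or.inr ((PySem.Set.mem_ofList w c).mpr (by simpa using hc)))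
  have hmemI : ∀ c ∈ (cw : Multiset Char) ∩ (w : Multiset Char),
      c ∈ PySem.Set.update (PySem.Set.ofList cw) (PySem.Set.ofList w) :=
    fun c hc => hmemcw c (Multiset.mem_of_le Multiset.inter_le_left hc)
  rw [values_subtract, foldPair, List.map_map, List.map_map]
  have hpos : ((PySem.Set.update (PySem.Set.ofList cw) (PySem.Set.ofList w)).map
      ((fun d => max d 0) ∘ fun c => (cw.count c : Int) - (w.count c : Int))).sum
      = (cw.length : Int) - (((cw : Multiset Char) ∩ (w : Multiset Char)).card : Int) := by
    have hpt : ∀ c ∈ PySem.Set.update (PySem.Set.ofList cw) (PySem.Set.ofList w),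
        ((fun d => max d 0) ∘ fun c => (cw.count c : Int) - (w.count c : Int)) c
          = ((cw : Multiset Char).count c : Int)
            - (((cw : Multiset Char) ∩ (w : Multiset Char)).count c : Int) := by
      intro c _
      simp only [Function.comp_apply, Multiset.count_inter, Multiset.coe_count]
      push_cast
      omega
    rw [List.map_congr_left hpt, sum_map_sub,
      sum_count_list _ hU _ hmemcw, sum_count_list _ hU _ hmemI]
    simp
  have hneg : ((PySem.Set.update (PySem.Set.ofList cw) (PySem.Set.ofList w)).map
      ((fun d => max (-d) 0) ∘ fun c => (cw.count c : Int) - (w.count c : Int))).sum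
      = (w.length : Int) - (((cw : Multiset Char) ∩ (w : Multiset Char)).card : Int) := by
    have hpt : ∀ c ∈ PySem.Set.update (PySem.Set.ofList cw) (PySem.Set.ofList w),
        ((fun d => max (-d) 0) ∘ fun c => (cw.count c : Int) - (w.count c : Int)) c
          = ((w : Multiset Char).count c : Int)
            - (((cw : Multiset Char) ∩ (w : Multiset Char)).count c : Int) := by
      intro c _
      simp only [Function.comp_apply, Multiset.count_inter, Multiset.coe_count]
      push_cast
      omega
    rw [List.map_congr_left hpt, sum_map_sub,
      sum_count_list _ hU _ hmemw, sum_count_list _ hU _ hmemI]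
    simp
  rw [hpos, hneg]
  simp

theorem solution_spec : Claim_equal_solution := by
  intro word cmp_words _
  simp only [Spec_solution, solution, solution_alt]
  congr 1
  funext sim cw
  rw [sums_subtract word.toList cw.toList]
  have h1 : ((PySem.List.sorted word.toList (fun c => c) false : List Char) : Multiset Char)
      = (word.toList : Multiset Char) :=
    Multiset.coe_eq_coe.mpr (PySem.List.sorted_perm word.toList (fun c => c) false)
  have h2 : ((PySem.List.sorted cw.toList (fun c => c) false : List Char) : Multiset Char)
      = (cw.toList : Multiset Char) :=
    Multiset.coe_eq_coe.mpr (PySem.List.sorted_perm cw.toList (fun c => c) false)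
  have hcommon : mergeCommon (PySem.List.sorted word.toList (fun c => c) false)
      (PySem.List.sorted cw.toList (fun c => c) false)
      = (((cw.toList : Multiset Char) ∩ (word.toList : Multiset Char)).card : Int) := by
    rw [mergeCommon_eq _ _ (PySem.List.sorted_pairwise word.toList (fun c => c))
      (PySem.List.sorted_pairwise cw.toList (fun c => c)), h1, h2, Multiset.inter_comm]
  rw [hcommon]
  by_cases hP : (cw.toList.length : Int)
        - (((cw.toList : Multiset Char) ∩ (word.toList : Multiset Char)).card : Int) < 2
      ∧ (word.toList.length : Int)
        - (((cw.toList : Multiset Char) ∩ (word.toList : Multiset Char)).card : Int) < 2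
  · rw [if_pos (max_lt_iff.mpr ⟨hP.1, hP.2⟩), if_pos hP]
  · rw [if_neg (fun hm => hP ⟨(max_lt_iff.mp hm).1, (max_lt_iff.mp hm).2⟩), if_neg hP]
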